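-- pv_equiv track=rewrite | github.com/SlugTPU/gf180mcu-slugtpu | cocotb/test_sysray_nxn.py | tiled_matmul_ref
-- ===== SOURCE A (Python) =====
-- def vec_mat_mul_ref(acts, weights):
--     """C[j] = sum_i acts[i] * weights[i][j]  (vector @ matrix, column outputs)"""
--     N = len(acts)
--     return [sum(acts[i] * weights[i][j] for i in range(N)) for j in range(N)]
--
-- def mat_mat_mul_ref(act_matrix, weights):
--     """Compute act_matrix @ weights row-by-row; returns an N×N output matrix."""
--     return [vec_mat_mul_ref(act_row, weights) for act_row in act_matrix]
--
-- def tiled_matmul_ref(act_banks, weight_banks):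
--     """
--     Reference for one N×N output tile, accumulating over K inner-dimension tiles.
--
--     Computes: C = sum_k act_banks[k] @ weight_banks[k]
--
--     Each act_banks[k] and weight_banks[k] is an N×N tile representing one slice
--     along the shared inner dimension of a larger multiply. Their partial products
--     are summed into a single N×N accumulated output tile.
--     """
--     N = len(act_banks[0])
--     K = len(act_banks)
--     result = [[0] * N for _ in range(N)]
--     for k in range(K):
--         partial = mat_mat_mul_ref(act_banks[k], weight_banks[k])
--         for m in range(N):
--             for j in range(N):
--                 result[m][j] += partial[m][j]
--     return result
-- ===== SOURCE B (Python) =====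
-- def tiled_matmul_ref(act_banks, weight_banks):
--     """Element-at-a-time re-implementation: no helper functions, no partial
--     matrices; each output element is accumulated directly over the K tiles."""
--     N = len(act_banks[0])
--     K = len(act_banks)
--     result = []
--     for m in range(N):
--         row = []
--         for j in range(N):
--             acc = 0
--             for k in range(K):
--                 acc += sum(act_banks[k][m][i] * weight_banks[k][i][j] for i in range(N))
--             row.append(acc)
--         result.append(row)
--     return result
-- ===== Notes on version B (the rewrite author's own statement) =====
-- stated objective: simpler
-- what changed: Dropped the vec_mat_mul/mat_mat_mul helpers and the K intermediate N-by-N partial matrices: B loops over output coordinates (m,j) outermost and accumulates each element directly over the K tiles in one fused pass with no temporaries.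
-- outside the precondition, e.g. on tiled_matmul_ref([], []): A raises IndexError, B raises IndexError
import Mathlib
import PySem

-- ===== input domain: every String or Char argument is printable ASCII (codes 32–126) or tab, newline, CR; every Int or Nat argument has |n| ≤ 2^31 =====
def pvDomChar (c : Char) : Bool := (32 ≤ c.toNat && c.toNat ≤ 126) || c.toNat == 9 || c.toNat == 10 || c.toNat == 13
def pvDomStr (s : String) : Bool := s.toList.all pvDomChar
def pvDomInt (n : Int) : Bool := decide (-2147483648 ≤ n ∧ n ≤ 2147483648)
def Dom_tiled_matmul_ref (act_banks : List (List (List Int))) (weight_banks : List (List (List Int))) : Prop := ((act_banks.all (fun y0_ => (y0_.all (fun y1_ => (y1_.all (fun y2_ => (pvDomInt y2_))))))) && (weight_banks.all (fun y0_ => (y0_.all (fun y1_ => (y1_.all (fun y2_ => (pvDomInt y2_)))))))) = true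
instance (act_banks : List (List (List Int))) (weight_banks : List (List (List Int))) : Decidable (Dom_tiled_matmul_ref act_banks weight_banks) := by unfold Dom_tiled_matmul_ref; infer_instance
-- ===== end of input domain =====

-- B replaces A's helper functions and the K intermediate partial matrices by a direct
-- per-element accumulation (objective: simpler); same integer results on Pre_.

-- ===== PORT A =====
def vec_mat_mul_ref (acts : List Int) (weights : List (List Int)) : List Int :=
  let N := acts.length
  (List.range N).map (fun j =>
    ((List.range N).map (fun i => acts.getD i 0 * (weights.getD i []).getD j 0)).sum)

def mat_mat_mul_ref (act_matrix : List (List Int)) (weights : List (List Int)) : List (List Int) :=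
  act_matrix.map (fun act_row => vec_mat_mul_ref act_row weights)

def tiled_matmul_ref (act_banks : List (List (List Int))) (weight_banks : List (List (List Int))) : List (List Int) :=
  let N := (act_banks.getD 0 []).length
  let K := act_banks.length
  let result0 := (List.range N).map (fun _ => List.replicate N (0 : Int))
  (List.range K).foldl (fun result k =>
    let part := mat_mat_mul_ref (act_banks.getD k []) (weight_banks.getD k [])
    (List.range N).foldl (fun result m =>
      (List.range N).foldl (fun result j =>
        result.modify m (fun row => row.modify j (fun x => x + (part.getD m []).getD j 0))) result)
      result) result0

-- ===== PORT B =====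
def tiled_matmul_ref_alt (act_banks : List (List (List Int))) (weight_banks : List (List (List Int))) : List (List Int) :=
  let N := (act_banks.getD 0 []).length
  let K := act_banks.length
  (List.range N).map (fun m =>
    (List.range N).map (fun j =>
      (List.range K).foldl (fun acc k =>
        acc + ((List.range N).map (fun i =>
          ((act_banks.getD k []).getD m []).getD i 0 *
          ((weight_banks.getD k []).getD i []).getD j 0)).sum) 0))

-- ===== PRECONDITION & SPEC =====
-- Pre_ excludes the inputs on which the Python A raises IndexError (empty act_banks,
-- too-few/too-small weight tiles, act tiles with fewer than N rows), and also the act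
-- tiles whose first N rows are not of length N, where A still returns but its value
-- depends on the accidental per-row lengths rather than on the tile size N.
def Pre_tiled_matmul_ref (act_banks : List (List (List Int))) (weight_banks : List (List (List Int))) : Prop :=
  act_banks ≠ [] ∧
  (∀ t ∈ act_banks, (act_banks.getD 0 []).length ≤ t.length ∧
      ∀ r ∈ t.take (act_banks.getD 0 []).length, r.length = (act_banks.getD 0 []).length) ∧
  act_banks.length ≤ weight_banks.length ∧
  (∀ p ∈ act_banks.zip weight_banks, ∀ r ∈ p.1,
      r.length ≤ p.2.length ∧ ∀ wr ∈ p.2.take r.length, r.length ≤ wr.length)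

instance (act_banks : List (List (List Int))) (weight_banks : List (List (List Int))) : Decidable (Pre_tiled_matmul_ref act_banks weight_banks) := by unfold Pre_tiled_matmul_ref; infer_instance

def pvWitness_tiled_matmul_ref : List (List (List Int)) × List (List (List Int)) :=
  ([[[1, 2], [3, 4]]], [[[5, 6], [7, 8]]])

def Spec_tiled_matmul_ref (act_banks : List (List (List Int))) (weight_banks : List (List (List Int))) (out : List (List Int)) : Prop := out = tiled_matmul_ref_alt act_banks weight_banks
instance (act_banks : List (List (List Int))) (weight_banks : List (List (List Int))) (out : List (List Int)) : Decidable (Spec_tiled_matmul_ref act_banks weight_banks out) := by unfold Spec_tiled_matmul_ref; infer_instance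

-- ===== CLAIM (what is proved, stated in full; the proofs are below) =====
def Claim_equal_tiled_matmul_ref : Prop := ∀ (act_banks : List (List (List Int))) (weight_banks : List (List (List Int))), Dom_tiled_matmul_ref act_banks weight_banks → Pre_tiled_matmul_ref act_banks weight_banks → Spec_tiled_matmul_ref act_banks weight_banks (tiled_matmul_ref act_banks weight_banks)

-- ===== LEMMAS AND PROOFS =====

/-- Functional view of an N×N matrix. -/
def pvOfFun (N : Nat) (f : Nat → Nat → Int) : List (List Int) :=
  (List.range N).map (fun m => (List.range N).map (f m))

theorem pvOfFun_congr {N : Nat} {f g : Nat → Nat → Int}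
    (h : ∀ m < N, ∀ j < N, f m j = g m j) : pvOfFun N f = pvOfFun N g := by
  unfold pvOfFun
  apply List.map_congr_left
  intro m hm
  apply List.map_congr_left
  intro j hj
  exact h m (List.mem_range.mp hm) j (List.mem_range.mp hj)

theorem pvGetD_map {α β : Type} (l : List α) (f : α → β) (m : Nat) (d : α) (dflt : β)
    (hm' : m < l.length) : (l.map f).getD m dflt = f (l.getD m d) := by
  simp [List.getD, List.getElem?_map, List.getElem?_eq_getElem hm']

theorem pvGetD_map_range {β : Type} (N : Nat) (g : Nat → β) (j : Nat) (dflt : β)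
    (hj : j < N) : ((List.range N).map g).getD j dflt = g j := by
  rw [pvGetD_map (List.range N) g j 0 dflt (by simpa using hj)]
  simp [List.getD, List.getElem?_range hj]

/-- One `result[m][j] += c` step on the functional view. -/
theorem pvModify_step (N : Nat) (f : Nat → Nat → Int) (m j : Nat) (c : Int)
    (_hm : m < N) (_hj : j < N) :
    (pvOfFun N f).modify m (fun row => row.modify j (fun x => x + c)) =
      pvOfFun N (fun m' j' => if m' = m ∧ j' = j then f m' j' + c else f m' j') := by
  unfold pvOfFun
  apply List.ext_getElem
  · simp
  intro m' hl hr
  rw [List.getElem_modify]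
  have hm'N : m' < N := by simpa using hr
  simp only [List.getElem_map, List.getElem_range]
  by_cases hmm : m = m'
  · rw [if_pos hmm]
    subst hmm
    apply List.ext_getElem
    · simp
    intro j' hl2 hr2
    have hj'N : j' < N := by simpa using hr2
    rw [List.getElem_modify]
    simp only [List.getElem_map, List.getElem_range]
    by_cases hjj : j = j'
    · subst hjj
      simp
    · rw [if_neg hjj, if_neg (fun hc => hjj hc.2.symm)]
  · rw [if_neg hmm]
    apply List.map_congr_left
    intro j' _
    rw [if_neg (fun hc => hmm hc.1.symm)]

/-- The inner j-loop of A on the functional view. -/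
theorem pvLoopJ (N : Nat) (f : Nat → Nat → Int) (m : Nat) (P : Nat → Int)
    (hm : m < N) : ∀ t ≤ N,
    (List.range t).foldl
        (fun r j => r.modify m (fun row => row.modify j (fun x => x + P j))) (pvOfFun N f) =
      pvOfFun N (fun m' j' => if m' = m ∧ j' < t then f m' j' + P j' else f m' j') := by
  intro t
  induction t with
  | zero =>
    intro _
    simp only [List.range_zero, List.foldl_nil]
    exact pvOfFun_congr (by intro m' _ j' _; simp)
  | succ t ih =>
    intro ht
    rw [List.range_succ, List.foldl_append, ih (by omega), List.foldl_cons, List.foldl_nil,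
      pvModify_step N _ m t (P t) hm (by omega)]
    apply pvOfFun_congr
    intro m' _ j' _
    by_cases h1 : m' = m ∧ j' = t
    · obtain ⟨h1a, h1b⟩ := h1
      subst h1a; subst h1b
      simp
    · rw [if_neg h1]
      by_cases h2 : m' = m ∧ j' < t
      · obtain ⟨h2a, h2b⟩ := h2
        subst h2a
        simp [h2b, Nat.lt_succ_of_lt h2b]
      · rw [if_neg h2, if_neg]
        intro hc
        obtain ⟨hca, hcb⟩ := hc
        by_cases hjt : j' = t
        · exact h1 ⟨hca, hjt⟩
        · exact h2 ⟨hca, by omega⟩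

/-- The m-loop of A on the functional view. -/
theorem pvLoopM (N : Nat) (f : Nat → Nat → Int) (P : Nat → Nat → Int) : ∀ t ≤ N,
    (List.range t).foldl
        (fun r m => (List.range N).foldl
          (fun r j => r.modify m (fun row => row.modify j (fun x => x + P m j))) r)
        (pvOfFun N f) =
      pvOfFun N (fun m j => if m < t then f m j + P m j else f m j) := by
  intro t
  induction t with
  | zero =>
    intro _
    simp only [List.range_zero, List.foldl_nil]
    exact pvOfFun_congr (by intro m _ j _; simp)
  | succ t ih =>
    intro ht
    rw [List.range_succ, List.foldl_append, ih (by omega), List.foldl_cons, List.foldl_nil,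
      pvLoopJ N _ t _ (by omega) N (le_refl N)]
    apply pvOfFun_congr
    intro m hmN j hjN
    by_cases h1 : m = t
    · subst h1
      simp [hjN]
    · rw [if_neg (fun hc => h1 hc.1)]
      by_cases h2 : m < t
      · simp [h2, Nat.lt_succ_of_lt h2]
      · rw [if_neg h2, if_neg (by omega)]

/-- The k-loop of A on the functional view. -/
theorem pvLoopK (N : Nat) (f : Nat → Nat → Int) (P : Nat → Nat → Nat → Int) : ∀ K : Nat,
    (List.range K).foldl
        (fun r k => (List.range N).foldl
          (fun r m => (List.range N).foldl
            (fun r j => r.modify m (fun row => row.modify j (fun x => x + P k m j))) r) r)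
        (pvOfFun N f) =
      pvOfFun N (fun m j => (List.range K).foldl (fun acc k => acc + P k m j) (f m j)) := by
  intro K
  induction K with
  | zero => simp [List.range_zero]
  | succ K ih =>
    rw [List.range_succ, List.foldl_append, ih, List.foldl_cons, List.foldl_nil,
      pvLoopM N _ _ N (le_refl N)]
    apply pvOfFun_congr
    intro m hm j hj
    rw [if_pos hm, List.foldl_append, List.foldl_cons, List.foldl_nil]

theorem pvResult0 (N : Nat) :
    (List.range N).map (fun _ => List.replicate N (0 : Int)) = pvOfFun N (fun _ _ => 0) := by
  unfold pvOfFun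
  apply List.map_congr_left
  intro m _
  simp

-- ===== VERDICT (by name: the statement is the Claim_ definition above) =====
theorem tiled_matmul_ref_spec : Claim_equal_tiled_matmul_ref := by
  intro a w _ hpre
  obtain ⟨-, hact, -, -⟩ := hpre
  unfold Spec_tiled_matmul_ref tiled_matmul_ref tiled_matmul_ref_alt
  simp only []
  rw [pvResult0, pvLoopK ((a.getD 0 []).length) (fun _ _ => 0)
    (fun k m j => (((mat_mat_mul_ref (a.getD k []) (w.getD k [])).getD m []).getD j 0))]
  unfold pvOfFun
  apply List.map_congr_left
  intro m hm
  apply List.map_congr_left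
  intro j hj
  rw [List.mem_range] at hm hj
  apply PySem.List.foldl_congr_mem
  intro acc k hk
  rw [List.mem_range] at hk
  congr 1
  -- part[m][j] = Σ_{i<N} a[k][m][i] * w[k][i][j]
  have hakmem : a.getD k [] ∈ a := by
    rw [List.getD_eq_getElem a [] hk]; exact List.getElem_mem hk
  obtain ⟨haklen, hakrows⟩ := hact _ hakmem
  have hmN : m < (a.getD k []).length := lt_of_lt_of_le hm haklen
  unfold mat_mat_mul_ref
  rw [pvGetD_map (a.getD k []) _ m [] [] hmN]
  have hrowmem : (a.getD k []).getD m [] ∈ (a.getD k []).take ((a.getD 0 []).length) := by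
    have hmt : m < ((a.getD k []).take ((a.getD 0 []).length)).length := by
      rw [List.length_take]; omega
    have : ((a.getD k []).take ((a.getD 0 []).length))[m] = (a.getD k [])[m] :=
      List.getElem_take
    rw [List.getD_eq_getElem _ [] hmN, ← this]
    exact List.getElem_mem hmt
  have hrowlen : ((a.getD k []).getD m []).length = (a.getD 0 []).length :=
    hakrows _ hrowmem
  unfold vec_mat_mul_ref
  simp only []
  rw [hrowlen, pvGetD_map_range ((a.getD 0 []).length) _ j 0 hj]
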